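-- pv_equiv track=rewrite | github.com/Algorithm-Study/Algorithm | hash/P42579_이성우.py | solution
-- ===== SOURCE A (Python) =====
-- from collections import defaultdict
--
-- def solution(genres, plays):
--     total_dict = defaultdict(list)
--     answer = []
--     for gen, play, idx in zip(genres, plays, range(len(genres))):
--         total_dict[gen].append([play, idx])
--
--     sorted_genres = sorted(total_dict, key = lambda x : -sum(t[0] for t in total_dict[x]))
--     for t in sorted_genres:
--         tmp = sorted(total_dict[t], key = lambda x : -x[0])
--         answer += [x[1] for x in tmp][:2]
--
--     return answer
-- ===== SOURCE B (Python) =====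
-- def solution(genres, plays):
--     totals = {}
--     groups = {}
--     order = []
--     for i, (g, p) in enumerate(zip(genres, plays)):
--         if g not in totals:
--             order.append(g)
--             totals[g] = 0
--             groups[g] = []
--         totals[g] += p
--         groups[g].append(i)
--     answer = []
--     for g in sorted(order, key=lambda x: -totals[x]):
--         first = second = -1
--         for i in groups[g]:
--             if first == -1 or plays[i] > plays[first]:
--                 second = first
--                 first = i
--             elif second == -1 or plays[i] > plays[second]:
--                 second = i
--         answer.append(first)
--         if second != -1:
--             answer.append(second)
--     return answer
-- ===== Notes on version B (the rewrite author's own statement) =====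
-- stated objective: alternative
-- what changed: B builds genre order, running totals and per-genre index lists in one pass (instead of a defaultdict of [play,idx] pairs with totals re-summed inside the genre sort key), and replaces A's per-genre sort-and-slice with a linear top-2 selection scan per genre.
import Mathlib
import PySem

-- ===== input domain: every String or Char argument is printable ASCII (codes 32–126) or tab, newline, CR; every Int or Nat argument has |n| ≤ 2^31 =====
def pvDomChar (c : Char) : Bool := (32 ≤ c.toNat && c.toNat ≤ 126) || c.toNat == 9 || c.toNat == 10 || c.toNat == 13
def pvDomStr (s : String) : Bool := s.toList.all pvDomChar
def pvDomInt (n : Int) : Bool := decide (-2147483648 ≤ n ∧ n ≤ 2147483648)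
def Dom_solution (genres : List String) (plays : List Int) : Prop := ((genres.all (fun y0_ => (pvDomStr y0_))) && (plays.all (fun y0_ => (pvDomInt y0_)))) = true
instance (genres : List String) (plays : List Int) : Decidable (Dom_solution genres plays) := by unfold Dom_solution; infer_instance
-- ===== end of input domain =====

-- B replaces A's per-genre sort with a one-pass build of order/totals/index-groups and a
-- top-2 selection scan per genre (alternative decomposition, same asymptotics).


-- ===== PORT A =====
-- for gen, play, idx in zip(genres, plays, range(len(genres))): total_dict[gen].append([play, idx])
def solutionDict (genres : List String) (plays : List Int) : PySem.Dict String (List (Int × Int)) :=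
  (PySem.List.enumerate (genres.zip plays) 0).foldl
    (fun d t => d.modify t.2.1 [] (· ++ [(t.2.2, t.1)])) PySem.Dict.empty

def solution (genres : List String) (plays : List Int) : List Int :=
  let td := solutionDict genres plays
  let sortedGenres := PySem.List.sorted td.keys
    (fun x => -(((td.getD x []).map (fun t => t.1)).sum)) false
  sortedGenres.foldl (fun answer t =>
    answer ++ (((PySem.List.sorted (td.getD t []) (fun x => -x.1) false).map (fun x => x.2)).take 2)) []

-- ===== PORT B =====
-- loop body: on first sight of g append it to order and initialise totals/groups; then add p and i
def solutionAltStep (st : List String × PySem.Dict String Int × PySem.Dict String (List Int))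
    (t : Int × String × Int) : List String × PySem.Dict String Int × PySem.Dict String (List Int) :=
  let g := t.2.1
  let st1 := if st.2.1.contains g then st
             else (st.1 ++ [g], st.2.1.insert g 0, st.2.2.insert g [])
  (st1.1, st1.2.1.insert g (st1.2.1.getD g 0 + t.2.2),
   st1.2.2.insert g (st1.2.2.getD g [] ++ [t.1]))

-- one pass: order (first appearance), totals, per-genre index lists
def solutionAltBuild (genres : List String) (plays : List Int) :
    List String × PySem.Dict String Int × PySem.Dict String (List Int) :=
  (PySem.List.enumerate (genres.zip plays) 0).foldl solutionAltStep
    ([], PySem.Dict.empty, PySem.Dict.empty)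

-- top-2 selection scan: first/second indices, sentinel -1
def solutionAltSel (plays : List Int) (idxs : List Int) : Int × Int :=
  idxs.foldl (fun fs i =>
    if fs.1 == -1 || PySem.List.pyGetD plays i 0 > PySem.List.pyGetD plays fs.1 0 then (i, fs.1)
    else if fs.2 == -1 || PySem.List.pyGetD plays i 0 > PySem.List.pyGetD plays fs.2 0 then (fs.1, i)
    else fs) (-1, -1)

def solution_alt (genres : List String) (plays : List Int) : List Int :=
  let st := solutionAltBuild genres plays
  (PySem.List.sorted st.1 (fun x => -(st.2.1.getD x 0)) false).foldl
    (fun answer g =>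
      let fs := solutionAltSel plays (st.2.2.getD g [])
      let answer := answer ++ [fs.1]
      if fs.2 ≠ -1 then answer ++ [fs.2] else answer) []

-- ===== PRECONDITION & SPEC =====
def Spec_solution (genres : List String) (plays : List Int) (out : List Int) : Prop := out = solution_alt genres plays
instance (genres : List String) (plays : List Int) (out : List Int) : Decidable (Spec_solution genres plays out) := by unfold Spec_solution; infer_instance

-- ===== CLAIM (what is proved, stated in full; the proofs are below) =====
def Claim_equal_solution : Prop := ∀ (genres : List String) (plays : List Int), Dom_solution genres plays → Spec_solution genres plays (solution genres plays)

-- ===== LEMMAS AND PROOFS =====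

-- A's grouping dict: value at g = the (play, idx) pairs of genre g, in index order
theorem solutionDict_getD (genres : List String) (plays : List Int) (g : String) :
    (solutionDict genres plays).getD g [] =
      ((PySem.List.enumerate (genres.zip plays) 0).filter (fun t => t.2.1 == g)).map
        (fun t => (t.2.2, t.1)) := by
  unfold solutionDict
  rw [← List.foldl_map (f := fun t : Int × String × Int => (t.2.1, (t.2.2, t.1)))
        (g := fun (d : PySem.Dict String (List (Int × Int))) p => d.modify p.1 [] (· ++ [p.2]))]
  rw [PySem.Dict.getD_foldl_modify_append]
  simp [List.filter_map, List.map_map, Function.comp_def]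

theorem solutionDict_keys (genres : List String) (plays : List Int) :
    (solutionDict genres plays).keys =
      PySem.Set.update [] ((PySem.List.enumerate (genres.zip plays) 0).map (fun t => t.2.1)) := by
  unfold solutionDict
  have h := PySem.Dict.keys_foldl_modify_key (PySem.List.enumerate (genres.zip plays) 0)
    (fun t => t.2.1) [] (fun _ t xs => xs ++ [(t.2.2, t.1)]) PySem.Dict.empty
  simpa using h

-- B's build fold: order, totals and groups, characterised from any invariant-respecting start
theorem solutionAltStep_foldl_spec (l : List (Int × String × Int))
    (st : List String × PySem.Dict String Int × PySem.Dict String (List Int))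
    (hto : ∀ g, st.2.1.contains g = decide (g ∈ st.1))
    (hgo : ∀ g, st.2.2.contains g = decide (g ∈ st.1)) :
    (l.foldl solutionAltStep st).1 = PySem.Set.update st.1 (l.map (fun t => t.2.1))
    ∧ (∀ g, (l.foldl solutionAltStep st).2.1.getD g 0 =
        st.2.1.getD g 0 + ((l.filter (fun t => t.2.1 == g)).map (fun t => t.2.2)).sum)
    ∧ (∀ g, (l.foldl solutionAltStep st).2.2.getD g [] =
        st.2.2.getD g [] ++ (l.filter (fun t => t.2.1 == g)).map (fun t => t.1)) := by
  induction l generalizing st with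
  | nil => simp [PySem.Set.update]
  | cons t l ih =>
    obtain ⟨i, g0, p⟩ := t
    -- the step collapses to a uniform form
    have hstep : solutionAltStep st (i, g0, p) =
        (PySem.Set.add st.1 g0, st.2.1.insert g0 (st.2.1.getD g0 0 + p),
         st.2.2.insert g0 (st.2.2.getD g0 [] ++ [i])) := by
      unfold solutionAltStep
      by_cases h : st.2.1.contains g0 = true
      · have hm : g0 ∈ st.1 := by have := hto g0; rw [h] at this; simpa using this.symm
        simp [h, PySem.Set.add_of_mem hm]
      · have h' : st.2.1.contains g0 = false := by simpa using h
        have hm : g0 ∉ st.1 := by have := hto g0; rw [h'] at this; simpa using this.symm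
        have hg' : st.2.2.contains g0 = false := by rw [hgo g0]; simpa using hm
        simp [h', PySem.Set.add_of_not_mem hm, PySem.Dict.insert_insert_self,
          PySem.Dict.getD_insert_self, PySem.Dict.getD_of_not_contains _ _ h',
          PySem.Dict.getD_of_not_contains _ _ hg']
    rw [List.foldl_cons, hstep]
    have hto' : ∀ g, (st.2.1.insert g0 (st.2.1.getD g0 0 + p)).contains g
        = decide (g ∈ PySem.Set.add st.1 g0) := by
      intro g
      rw [PySem.Dict.contains_insert, hto g]
      by_cases h : g = g0 <;> simp [h, PySem.Set.mem_add]
    have hgo' : ∀ g, (st.2.2.insert g0 (st.2.2.getD g0 [] ++ [i])).contains g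
        = decide (g ∈ PySem.Set.add st.1 g0) := by
      intro g
      rw [PySem.Dict.contains_insert, hgo g]
      by_cases h : g = g0 <;> simp [h, PySem.Set.mem_add]
    obtain ⟨h1, h2, h3⟩ := ih (PySem.Set.add st.1 g0, st.2.1.insert g0 (st.2.1.getD g0 0 + p),
      st.2.2.insert g0 (st.2.2.getD g0 [] ++ [i])) hto' hgo'
    refine ⟨?_, ?_, ?_⟩
    · rw [h1]; simp [PySem.Set.update]
    · intro g
      rw [h2 g, PySem.Dict.getD_insert]
      by_cases h : g = g0
      · subst h; simp [List.filter_cons]; ring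
      · simp [h, Ne.symm h]
    · intro g
      rw [h3 g, PySem.Dict.getD_insert]
      by_cases h : g = g0
      · subst h; simp
      · simp [h, Ne.symm h]

-- B's selection step / A's insertion-sort step, and the invariant tying them together
def sel2step (f : Int → Int) (fs : Int × Int) (i : Int) : Int × Int :=
  if fs.1 == -1 || f i > f fs.1 then (i, fs.1)
  else if fs.2 == -1 || f i > f fs.2 then (fs.1, i)
  else fs

def ins2step (f : Int → Int) (acc2 : List (Int × Int)) (i : Int) : List (Int × Int) :=
  PySem.List.insertBy (fun u v => decide ((-u.1 : Int) < -v.1)) (f i, i) acc2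

def top2Inv (f : Int → Int) (p : Int × Int) (acc : List (Int × Int)) : Prop :=
  (p.1 = -1 ∧ p.2 = -1 ∧ acc = [])
  ∨ (0 ≤ p.1 ∧ p.2 = -1 ∧ acc = [(f p.1, p.1)])
  ∨ (0 ≤ p.1 ∧ 0 ≤ p.2 ∧ ∃ t, acc = (f p.1, p.1) :: (f p.2, p.2) :: t)

theorem top2_step (f : Int → Int) (p : Int × Int) (acc : List (Int × Int)) (i : Int)
    (hi : 0 ≤ i) (inv : top2Inv f p acc) :
    top2Inv f (sel2step f p i) (ins2step f acc i) := by
  obtain ⟨a, b⟩ := p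
  rcases inv with ⟨h1, h2, h3⟩ | ⟨h1, h2, h3⟩ | ⟨h1, h2, ⟨t, h3⟩⟩
  · subst h1 h2 h3
    simp [sel2step, ins2step, PySem.List.insertBy, top2Inv, hi]
  · subst h2 h3
    have ha : (a == -1) = false := by simp; omega
    by_cases hcmp : f a < f i
    · simp [sel2step, ins2step, PySem.List.insertBy, top2Inv, ha, hcmp, hi, h1]
    · simp [sel2step, ins2step, PySem.List.insertBy, top2Inv, ha, hcmp, hi, h1,
        not_lt.mpr (not_lt.mp hcmp)]
  · subst h3
    have ha : (a == -1) = false := by simp; omega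
    have hb : (b == -1) = false := by simp; omega
    by_cases hcmp : f a < f i
    · simp [sel2step, ins2step, PySem.List.insertBy, top2Inv, ha, hb, hcmp, hi, h1, h2]
    · by_cases hcmp2 : f b < f i
      · simp [sel2step, ins2step, PySem.List.insertBy, top2Inv, ha, hb, hcmp, hcmp2, hi, h1, h2]
      · simp [sel2step, ins2step, PySem.List.insertBy, top2Inv, ha, hb, hcmp, hcmp2, h1, h2]

theorem top2_foldl (f : Int → Int) (I : List Int) (hpos : ∀ i ∈ I, 0 ≤ i)
    (p : Int × Int) (acc : List (Int × Int)) (inv : top2Inv f p acc) :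
    top2Inv f (I.foldl (sel2step f) p) (I.foldl (ins2step f) acc) := by
  induction I generalizing p acc with
  | nil => simpa
  | cons i I ih =>
    exact ih (fun j hj => hpos j (List.mem_cons_of_mem _ hj)) _ _
      (top2_step f p acc i (hpos i (List.mem_cons_self)) inv)

-- per-genre chunk: stable sort's first two seconds = the selection scan's emission
theorem chunk_eq (f : Int → Int) (I : List Int) (hIne : I ≠ []) (hpos : ∀ i ∈ I, 0 ≤ i) :
    ((PySem.List.sorted (I.map (fun i => (f i, i))) (fun x => -x.1) false).map (fun x => x.2)).take 2
    = [(I.foldl (sel2step f) (-1,-1)).1]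
      ++ (if (I.foldl (sel2step f) (-1,-1)).2 ≠ -1 then [(I.foldl (sel2step f) (-1,-1)).2] else []) := by
  have hs : PySem.List.sorted (I.map (fun i => (f i, i))) (fun x => -x.1) false
      = I.foldl (ins2step f) [] := by
    rw [PySem.List.sorted_eq_foldl_insertBy, List.foldl_map]; rfl
  have hne : PySem.List.sorted (I.map (fun i => (f i, i))) (fun x => -x.1) false ≠ [] := by
    rw [Ne, PySem.List.sorted_eq_nil_iff]
    simp [hIne]
  rw [hs] at hne
  rcases top2_foldl f I hpos (-1, -1) [] (Or.inl ⟨rfl, rfl, rfl⟩) with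
    ⟨_, _, h3⟩ | ⟨h1, h2, h3⟩ | ⟨h1, h2, t, h3⟩
  · exact absurd h3 hne
  · rw [hs, h3, h2]; simp
  · have hb2 : (I.foldl (sel2step f) (-1, -1)).2 ≠ -1 := by omega
    rw [hs, h3]; simp [hb2]

-- each enumerated triple carries a nonnegative index whose plays-lookup is its play
theorem enum_fact (genres : List String) (plays : List Int) :
    ∀ t ∈ PySem.List.enumerate (genres.zip plays) 0,
      0 ≤ t.1 ∧ PySem.List.pyGetD plays t.1 0 = t.2.2 := by
  intro t ht
  rw [PySem.List.mem_enumerate_iff] at ht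
  obtain ⟨k, hk, rfl⟩ := ht
  have hkp : k < plays.length := lt_of_lt_of_le hk (by simp)
  refine ⟨by simp, ?_⟩
  simp only [zero_add, PySem.List.pyGetD_natCast, List.getElem_zip]
  exact List.getD_eq_getElem plays 0 hkp

-- ===== VERDICT (by name: the statement is the Claim_ definition above) =====
theorem solution_spec : Claim_equal_solution := by
  unfold Claim_equal_solution
  intro genres plays _
  unfold Spec_solution
  obtain ⟨hord, htot, hgrp⟩ := solutionAltStep_foldl_spec
    (PySem.List.enumerate (genres.zip plays) 0)
    ([], PySem.Dict.empty, PySem.Dict.empty) (by simp) (by simp)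
  have hkeys : (solutionDict genres plays).keys = (solutionAltBuild genres plays).1 := by
    rw [solutionDict_keys]; exact hord.symm
  have hkfun : (fun x => -(((solutionDict genres plays).getD x []).map (fun t => t.1)).sum)
      = (fun x => -((solutionAltBuild genres plays).2.1.getD x 0)) := by
    funext x
    rw [solutionDict_getD]
    show _ = -((PySem.List.enumerate (genres.zip plays) 0).foldl solutionAltStep
      ([], PySem.Dict.empty, PySem.Dict.empty)).2.1.getD x 0
    rw [htot x]
    simp [List.map_map, Function.comp_def]
  simp only [solution, solution_alt]
  rw [hkeys, hkfun]
  apply PySem.List.foldl_congr_mem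
  intro acc g hg
  rw [PySem.List.mem_sorted] at hg
  simp only [solutionAltBuild] at hg
  rw [hord] at hg
  rw [PySem.Set.mem_update] at hg
  simp only [List.mem_nil_iff, false_or, List.mem_map] at hg
  obtain ⟨t0, ht0, htg⟩ := hg
  set L := PySem.List.enumerate (genres.zip plays) 0 with hL
  set M := L.filter (fun t => t.2.1 == g) with hMdef
  have hMne : M ≠ [] := by
    have : t0 ∈ M := List.mem_filter.mpr ⟨ht0, by simp [htg]⟩
    intro h; rw [h] at this; exact List.not_mem_nil this
  set f : Int → Int := fun i => PySem.List.pyGetD plays i 0 with hf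
  have hI : (solutionAltBuild genres plays).2.2.getD g [] = M.map (fun t => t.1) := by
    show ((PySem.List.enumerate (genres.zip plays) 0).foldl solutionAltStep
      ([], PySem.Dict.empty, PySem.Dict.empty)).2.2.getD g [] = _
    rw [hgrp g]; simp; rw [hMdef]
  have hgd : (solutionDict genres plays).getD g []
      = (M.map (fun t => t.1)).map (fun i => (f i, i)) := by
    rw [solutionDict_getD, List.map_map]
    apply List.map_congr_left
    intro t ht
    have := (enum_fact genres plays t (List.mem_of_mem_filter ht)).2
    simp [hf, this]
  have hpos : ∀ i ∈ M.map (fun t => t.1), 0 ≤ i := by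
    intro i hi
    obtain ⟨t, ht, rfl⟩ := List.mem_map.mp hi
    exact (enum_fact genres plays t (List.mem_of_mem_filter ht)).1
  have hIne : M.map (fun t : Int × String × Int => t.1) ≠ [] := by
    simpa [List.map_eq_nil_iff] using hMne
  rw [hgd, chunk_eq f (M.map (fun t => t.1)) hIne hpos, hI]
  rw [show solutionAltSel plays (M.map (fun t => t.1))
      = (M.map (fun t => t.1)).foldl (sel2step f) (-1, -1) from rfl]
  split_ifs with h <;> simp
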